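-- pv_equiv track=rewrite | github.com/dhrunam/hcs_sso_with_oidc | apps/oidc/utils/claims.py | filter_claims_by_scope
-- ===== SOURCE A (Python) =====
-- def filter_claims_by_scope(claims, scopes):
--     """
--     Filter claims dictionary based on granted scopes
--
--     Args:
--         claims: Full claims dictionary
--         scopes: List of granted scopes
--
--     Returns:
--         Filtered claims dictionary
--     """
--     scopes_set = set(scopes)
--
--     # Define which claims belong to which scopes
--     scope_claims = {
--         'profile': ['name', 'given_name', 'family_name', 'preferred_username',
--                    'picture', 'updated_at'],
--         'email': ['email', 'email_verified'],
--         'phone': ['phone_number', 'phone_number_verified'],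
--         'address': ['address'],
--         'org': ['organization', 'department', 'employee_id', 'job_title',
--                'identity_provider'],
--         'locale': ['locale'],
--         'zoneinfo': ['zoneinfo'],
--     }
--
--     # Always include these claims
--     always_include = ['sub']
--
--     filtered_claims = {}
--
--     # Include always-included claims
--     for claim in always_include:
--         if claim in claims:
--             filtered_claims[claim] = claims[claim]
--
--     # Include scope-based claims
--     for scope, scope_claim_list in scope_claims.items():
--         if scope in scopes_set:
--             for claim in scope_claim_list:
--                 if claim in claims and claims[claim] is not None:
--                     filtered_claims[claim] = claims[claim]
--
--     return filtered_claims
-- ===== SOURCE B (Python) =====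
-- # Claims-driven single pass over claims.items() with a reverse index (claim -> (rank,
-- # owning scope)), then a sort by rank to restore the canonical claim order; A instead
-- # iterates the scope table with nested loops and probes claims repeatedly.
-- _INDEX = {
--     'sub': (0, None),
--     'name': (1, 'profile'), 'given_name': (2, 'profile'), 'family_name': (3, 'profile'),
--     'preferred_username': (4, 'profile'), 'picture': (5, 'profile'),
--     'updated_at': (6, 'profile'),
--     'email': (7, 'email'), 'email_verified': (8, 'email'),
--     'phone_number': (9, 'phone'), 'phone_number_verified': (10, 'phone'),
--     'address': (11, 'address'),
--     'organization': (12, 'org'), 'department': (13, 'org'), 'employee_id': (14, 'org'),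
--     'job_title': (15, 'org'), 'identity_provider': (16, 'org'),
--     'locale': (17, 'locale'),
--     'zoneinfo': (18, 'zoneinfo'),
-- }
--
--
-- def filter_claims_by_scope(claims, scopes):
--     granted = set(scopes)
--     picked = []
--     for name, value in claims.items():
--         entry = _INDEX.get(name)
--         if entry is None:
--             continue
--         rank, scope = entry
--         if scope is None or (scope in granted and value is not None):
--             picked.append((rank, name, value))
--     picked.sort(key=lambda t: t[0])
--     return {name: value for _, name, value in picked}
-- ===== Notes on version B (the rewrite author's own statement) =====
-- stated objective: alternative
-- what changed: B makes one pass over claims.items() consulting a reverse index claim->(rank, owning scope) and sorts the picked entries by rank, instead of A's nested loops over the scope->claims table that probe the claims dict per table entry.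
import Mathlib
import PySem

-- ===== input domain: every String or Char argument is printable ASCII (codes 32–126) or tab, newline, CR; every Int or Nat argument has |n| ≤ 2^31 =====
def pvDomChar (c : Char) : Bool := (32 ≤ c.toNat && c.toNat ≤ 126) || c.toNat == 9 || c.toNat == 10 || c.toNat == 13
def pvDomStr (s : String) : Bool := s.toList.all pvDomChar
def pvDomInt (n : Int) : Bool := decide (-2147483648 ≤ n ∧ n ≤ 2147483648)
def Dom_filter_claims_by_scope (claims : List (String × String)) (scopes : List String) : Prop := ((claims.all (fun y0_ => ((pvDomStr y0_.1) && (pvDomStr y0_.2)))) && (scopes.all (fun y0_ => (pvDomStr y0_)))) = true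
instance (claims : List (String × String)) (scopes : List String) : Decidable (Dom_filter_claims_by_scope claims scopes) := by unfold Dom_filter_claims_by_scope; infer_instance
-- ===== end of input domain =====

-- B replaces A's nested loops over the scope->claims table (probing the claims dict per
-- table entry) by one pass over claims.items() consulting a reverse index
-- claim -> (rank, owning scope), followed by a sort by rank (objective: alternative).
-- Claim values are Strings here, so Python's `is not None` guards are vacuously true in both ports.

-- ===== PORT A =====
-- the static scope_claims table of A
def pvScopeClaims : List (String × List String) :=
  [("profile", ["name", "given_name", "family_name", "preferred_username", "picture", "updated_at"]),
   ("email", ["email", "email_verified"]),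
   ("phone", ["phone_number", "phone_number_verified"]),
   ("address", ["address"]),
   ("org", ["organization", "department", "employee_id", "job_title", "identity_provider"]),
   ("locale", ["locale"]),
   ("zoneinfo", ["zoneinfo"])]

-- inner loop body of A: `if claim in claims and claims[claim] is not None: filtered[claim] = claims[claim]`
-- (`is not None` is vacuous: values are String)
def pvStepA (d : PySem.Dict String String) (acc : PySem.Dict String String) (claim : String) : PySem.Dict String String :=
  match PySem.Dict.get? d claim with
  | some v => PySem.Dict.insert acc claim v
  | none => acc

def filter_claims_by_scope (claims : List (String × String)) (scopes : List String) : List (String × String) :=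
  let d : PySem.Dict String String := PySem.Dict.mk claims
  let scopesSet : PySem.Set String := PySem.Set.ofList scopes
  -- for claim in always_include: if claim in claims: filtered[claim] = claims[claim]
  let f0 := (["sub"] : List String).foldl
    (fun acc claim =>
      match PySem.Dict.get? d claim with
      | some v => PySem.Dict.insert acc claim v
      | none => acc)
    PySem.Dict.empty
  -- for scope, scope_claim_list in scope_claims.items(): if scope in scopes_set: ...
  (pvScopeClaims.foldl
    (fun acc p =>
      if PySem.Set.contains scopesSet p.1 then p.2.foldl (pvStepA d) acc else acc)
    f0).items

-- ===== PORT B =====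
-- the reverse index _INDEX of Source B: claim -> (rank, owning scope; none = always included)
def pvIndex : PySem.Dict String (Int × Option String) :=
  PySem.Dict.mk
    [("sub", (0, none)),
     ("name", (1, some "profile")), ("given_name", (2, some "profile")), ("family_name", (3, some "profile")),
     ("preferred_username", (4, some "profile")), ("picture", (5, some "profile")), ("updated_at", (6, some "profile")),
     ("email", (7, some "email")), ("email_verified", (8, some "email")),
     ("phone_number", (9, some "phone")), ("phone_number_verified", (10, some "phone")),
     ("address", (11, some "address")),
     ("organization", (12, some "org")), ("department", (13, some "org")), ("employee_id", (14, some "org")),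
     ("job_title", (15, some "org")), ("identity_provider", (16, some "org")),
     ("locale", (17, some "locale")),
     ("zoneinfo", (18, some "zoneinfo"))]

-- `claims.items()` of the dict the association list represents: distinct keys in
-- first-occurrence order, each with its first value (= the convention's first-match lookup)
def pvItems : List (String × String) → List (String × String)
  | [] => []
  | p :: rest => p :: pvItems (rest.filter (fun q => q.1 ≠ p.1))
termination_by l => l.length
decreasing_by
  rw [List.length_unattach]
  exact Nat.lt_succ_of_le (le_trans (List.length_filter_le _ _) (le_of_eq List.length_attach))

def filter_claims_by_scope_alt (claims : List (String × String)) (scopes : List String) : List (String × String) :=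
  let granted : PySem.Set String := PySem.Set.ofList scopes
  -- for name, value in claims.items(): look the claim up in _INDEX, keep eligible ones with their rank
  let picked : List (Int × String × String) :=
    (pvItems claims).foldl
      (fun acc p =>
        match PySem.Dict.get? pvIndex p.1 with
        | none => acc
        | some rs =>
            if (match rs.2 with
                | none => true
                | some s => PySem.Set.contains granted s) then acc ++ [(rs.1, p.1, p.2)]
            else acc)
      []
  -- picked.sort(key=lambda t: t[0]); return {name: value for _, name, value in picked}
  let sortedPicked := PySem.List.sorted picked (fun t => t.1)
  (sortedPicked.foldl (fun acc t => PySem.Dict.insert acc t.2.1 t.2.2) PySem.Dict.empty).items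

-- ===== PRECONDITION & SPEC =====
def Spec_filter_claims_by_scope (claims : List (String × String)) (scopes : List String) (out : List (String × String)) : Prop := out = filter_claims_by_scope_alt claims scopes
instance (claims : List (String × String)) (scopes : List String) (out : List (String × String)) : Decidable (Spec_filter_claims_by_scope claims scopes out) := by unfold Spec_filter_claims_by_scope; infer_instance

-- ===== CLAIM (what is proved, stated in full; the proofs are below) =====
def Claim_equal_filter_claims_by_scope : Prop := ∀ (claims : List (String × String)) (scopes : List String), Dom_filter_claims_by_scope claims scopes → Spec_filter_claims_by_scope claims scopes (filter_claims_by_scope claims scopes)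

-- ===== LEMMAS AND PROOFS =====

-- canonical ranked claim table (proof-side view shared by both characterisations)
def pvRanked : List (Int × String × Option String) :=
  [(0, "sub", none),
   (1, "name", some "profile"), (2, "given_name", some "profile"), (3, "family_name", some "profile"),
   (4, "preferred_username", some "profile"), (5, "picture", some "profile"), (6, "updated_at", some "profile"),
   (7, "email", some "email"), (8, "email_verified", some "email"),
   (9, "phone_number", some "phone"), (10, "phone_number_verified", some "phone"),
   (11, "address", some "address"),
   (12, "organization", some "org"), (13, "department", some "org"), (14, "employee_id", some "org"),
   (15, "job_title", some "org"), (16, "identity_provider", some "org"),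
   (17, "locale", some "locale"),
   (18, "zoneinfo", some "zoneinfo")]

def pvScopeOk (S : PySem.Set String) : Option String → Bool
  | none => true
  | some s => PySem.Set.contains S s

def pvVal (d : PySem.Dict String String) (k : String) : String := (PySem.Dict.get? d k).getD ""

def pvKeepF (d : PySem.Dict String String) (S : PySem.Set String) (e : String × Option String) : Bool :=
  (PySem.Dict.get? d e.1).isSome && pvScopeOk S e.2

-- flat form of A's loop body (one step per tagged claim)
def pvStepF (d : PySem.Dict String String) (S : PySem.Set String)
    (acc : PySem.Dict String String) (e : String × Option String) : PySem.Dict String String :=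
  match PySem.Dict.get? d e.1 with
  | some v => if pvScopeOk S e.2 then PySem.Dict.insert acc e.1 v else acc
  | none => acc

-- the eligible entries in canonical order, with their ranks and values
def pvTT (d : PySem.Dict String String) (S : PySem.Set String) : List (Int × String × String) :=
  (pvRanked.filter (fun e => pvKeepF d S (e.2.1, e.2.2))).map (fun e => (e.1, e.2.1, pvVal d e.2.1))

-- B's loop body, test and payload separated (for the loop-shape lemmas)
def pvKeepB (S : PySem.Set String) (p : String × String) : Bool :=
  match PySem.Dict.get? pvIndex p.1 with
  | none => false
  | some rs => pvScopeOk S rs.2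

def pvGB (p : String × String) : Int × String × String :=
  (((PySem.Dict.get? pvIndex p.1).getD (0, none)).1, p.1, p.2)

-- ---- A-side characterisation ----

-- one scope group: folding the flat step over the tagged claim list is A's guarded inner loop
theorem pv_group (d : PySem.Dict String String) (S : PySem.Set String) (scope : String)
    (cs : List String) (acc : PySem.Dict String String) :
    (cs.map (fun c => (c, some scope))).foldl (pvStepF d S) acc
      = if PySem.Set.contains S scope then cs.foldl (pvStepA d) acc else acc := by
  induction cs generalizing acc with
  | nil => simp
  | cons c cs ih =>
      simp only [List.map_cons, List.foldl_cons, ih, pvStepA, pvStepF, pvScopeOk]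
      cases PySem.Dict.get? d c <;> split_ifs <;> rfl

-- grouped form of the flat fold equals A's outer loop
theorem pv_main (d : PySem.Dict String String) (S : PySem.Set String)
    (groups : List (String × List String)) (acc : PySem.Dict String String) :
    (groups.flatMap (fun p => p.2.map (fun c => (c, some p.1)))).foldl (pvStepF d S) acc
      = groups.foldl (fun acc p => if PySem.Set.contains S p.1 then p.2.foldl (pvStepA d) acc else acc) acc := by
  induction groups generalizing acc with
  | nil => rfl
  | cons g gs ih => simp only [List.flatMap_cons, List.foldl_append, List.foldl_cons, pv_group, ih]

-- the flattened ranked table projects to A's table with 'sub' in front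
theorem pv_flat_eq :
    pvRanked.map (fun e => (e.2.1, e.2.2)) = ("sub", (none : Option String)) ::
      pvScopeClaims.flatMap (fun p => p.2.map (fun c => (c, some p.1))) := rfl

theorem pv_A_char (claims : List (String × String)) (scopes : List String) :
    filter_claims_by_scope claims scopes
      = (((pvRanked.map (fun e => (e.2.1, e.2.2))).foldl
            (pvStepF (PySem.Dict.mk claims) (PySem.Set.ofList scopes)) PySem.Dict.empty)).items := by
  unfold filter_claims_by_scope
  rw [pv_flat_eq]
  simp only [List.foldl, pv_main]
  congr 1

theorem pv_stepF_if (d : PySem.Dict String String) (S : PySem.Set String) :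
    pvStepF d S = fun acc e => if pvKeepF d S e then PySem.Dict.insert acc e.1 (pvVal d e.1) else acc := by
  funext acc e
  cases h : PySem.Dict.get? d e.1 <;> simp [pvStepF, pvKeepF, pvVal, h]

theorem pv_ranked_keys_nodup : (pvRanked.map (fun e => e.2.1)).Nodup := by decide

theorem pv_ranked_pairwise : List.Pairwise (fun a b => a.1 < b.1) pvRanked := by decide

-- items of A's fold: the eligible tagged claims in table order, with their values
theorem pv_A_items (claims : List (String × String)) (scopes : List String) :
    filter_claims_by_scope claims scopes
      = (pvTT (PySem.Dict.mk claims) (PySem.Set.ofList scopes)).map (fun t => (t.2.1, t.2.2)) := by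
  have hnd : (((pvRanked.map (fun e => (e.2.1, e.2.2))).filter
      (pvKeepF (PySem.Dict.mk claims) (PySem.Set.ofList scopes))).map (fun e => e.1)).Nodup := by
    have hsub : (((pvRanked.map (fun e => (e.2.1, e.2.2))).filter
        (pvKeepF (PySem.Dict.mk claims) (PySem.Set.ofList scopes))).map (fun e => e.1)).Sublist
        ((pvRanked.map (fun e => (e.2.1, e.2.2))).map (fun e => e.1)) :=
      List.Sublist.map _ List.filter_sublist
    refine List.Nodup.sublist hsub ?_
    simpa [List.map_map, Function.comp] using pv_ranked_keys_nodup
  rw [pv_A_char, pv_stepF_if, PySem.List.foldl_if_eq_foldl_filter,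
      PySem.Dict.items_foldl_insert_fresh _ _ _ _ (fun a _ => PySem.Dict.contains_empty _) hnd]
  simp [pvTT, List.filter_map, List.map_map, Function.comp_def, PySem.Dict.empty]

-- ---- pvItems: first-match dict view of the association list ----

theorem pv_mem_pvItems_sub (l : List (String × String)) (x : String × String)
    (h : x ∈ pvItems l) : x ∈ l := by
  induction l using pvItems.induct with
  | case1 => simp [pvItems] at h
  | case2 p rest ih =>
      rw [List.unattach_filter (g := fun q => decide (q.1 ≠ p.1)) (hf := fun x h => rfl),
          List.unattach_attach] at ih
      rw [pvItems] at h
      rcases List.mem_cons.1 h with h | h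
      · exact h ▸ List.mem_cons_self ..
      · exact List.mem_cons_of_mem _ (List.mem_of_mem_filter (ih h))

theorem pv_pvItems_keys_nodup (l : List (String × String)) : ((pvItems l).map (fun p => p.1)).Nodup := by
  induction l using pvItems.induct with
  | case1 => simp [pvItems]
  | case2 p rest ih =>
      rw [List.unattach_filter (g := fun q => decide (q.1 ≠ p.1)) (hf := fun x h => rfl),
          List.unattach_attach] at ih
      rw [pvItems]
      refine List.nodup_cons.2 ⟨?_, ih⟩
      intro hmem
      obtain ⟨q, hq, hq1⟩ := List.mem_map.1 hmem
      have := List.of_mem_filter (pv_mem_pvItems_sub _ _ hq)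
      simp [hq1] at this

theorem pv_get?_mk_filter (l : List (String × String)) (c k : String) (h : k ≠ c) :
    (PySem.Dict.mk (l.filter (fun q => q.1 ≠ c))).get? k = (PySem.Dict.mk l).get? k := by
  induction l with
  | nil => rfl
  | cons q l ih =>
      by_cases hc : q.1 = c
      · rw [List.filter_cons_of_neg (by simp [hc]), ih, PySem.Dict.get?_mk_cons,
            if_neg (by simp [hc]; exact fun hk => h hk.symm)]
      · rw [List.filter_cons_of_pos (by simpa using hc), PySem.Dict.get?_mk_cons,
            PySem.Dict.get?_mk_cons, ih]

theorem pv_mem_pvItems (l : List (String × String)) (k v : String) :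
    (k, v) ∈ pvItems l ↔ (PySem.Dict.mk l).get? k = some v := by
  induction l using pvItems.induct with
  | case1 => simp [pvItems, PySem.Dict.get?]
  | case2 p rest ih =>
      rw [List.unattach_filter (g := fun q => decide (q.1 ≠ p.1)) (hf := fun x h => rfl),
          List.unattach_attach] at ih
      rw [pvItems, PySem.Dict.get?_mk_cons]
      by_cases hk : p.1 = k
      · rw [if_pos (by simpa using hk)]
        constructor
        · intro hmem
          rcases List.mem_cons.1 hmem with hmem | hmem
          · simp [← hmem]
          · have := List.of_mem_filter (pv_mem_pvItems_sub _ _ hmem)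
            simp [hk] at this
        · intro hv
          exact List.mem_cons.2 (Or.inl (by
            obtain rfl : v = p.2 := by simpa using hv.symm
            simp [← hk]))
      · rw [if_neg (by simpa using hk)]
        rw [← pv_get?_mk_filter rest p.1 k (fun hkk => hk hkk.symm)]
        constructor
        · intro hmem
          rcases List.mem_cons.1 hmem with hmem | hmem
          · exact absurd (congrArg Prod.fst hmem).symm hk
          · exact ih.1 hmem
        · intro hv
          exact List.mem_cons.2 (Or.inr (ih.2 hv))

-- ---- the reverse index against the ranked table ----

theorem pv_gen_idx (L : List (Int × String × Option String))
    (h : (L.map (fun e => e.2.1)).Nodup) (k : String) (r : Int) (sc : Option String) :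
    (PySem.Dict.mk (L.map (fun e => (e.2.1, (e.1, e.2.2))))).get? k = some (r, sc) ↔ (r, k, sc) ∈ L := by
  induction L with
  | nil => simp [PySem.Dict.get?]
  | cons e L ih =>
      obtain ⟨r1, k1, s1⟩ := e
      simp only [List.map_cons] at *
      rw [PySem.Dict.get?_mk_cons]
      have hnd := List.nodup_cons.1 h
      by_cases hk : k1 = k
      · subst hk
        rw [if_pos (by simp)]
        constructor
        · intro hv
          obtain ⟨rfl, rfl⟩ : r1 = r ∧ s1 = sc := by simpa using hv
          exact List.mem_cons_self ..
        · intro hmem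
          rcases List.mem_cons.1 hmem with hmem | hmem
          · obtain ⟨rfl, rfl⟩ : r1 = r ∧ s1 = sc := by simpa using hmem.symm
            rfl
          · exact absurd (List.mem_map.2 ⟨(r, k1, sc), hmem, rfl⟩) hnd.1
      · rw [if_neg (by simpa using hk)]
        rw [ih hnd.2]
        constructor
        · exact fun hmem => List.mem_cons_of_mem _ hmem
        · intro hmem
          rcases List.mem_cons.1 hmem with hmem | hmem
          · exact absurd (congrArg (fun t => t.2.1) hmem).symm hk
          · exact hmem

theorem pv_idx (k : String) (r : Int) (sc : Option String) :
    PySem.Dict.get? pvIndex k = some (r, sc) ↔ (r, k, sc) ∈ pvRanked :=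
  pv_gen_idx pvRanked pv_ranked_keys_nodup k r sc

-- ---- B-side characterisation ----

theorem pv_picked (claims : List (String × String)) (S : PySem.Set String) :
    ((pvItems claims).foldl
      (fun acc p =>
        match PySem.Dict.get? pvIndex p.1 with
        | none => acc
        | some rs =>
            if (match rs.2 with
                | none => true
                | some s => PySem.Set.contains S s) then acc ++ [(rs.1, p.1, p.2)]
            else acc)
      ([] : List (Int × String × String)))
      = ((pvItems claims).filter (pvKeepB S)).map pvGB := by
  have hstep : (fun (acc : List (Int × String × String)) (p : String × String) =>
      match PySem.Dict.get? pvIndex p.1 with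
      | none => acc
      | some rs =>
          if (match rs.2 with
              | none => true
              | some s => PySem.Set.contains S s) then acc ++ [(rs.1, p.1, p.2)]
          else acc)
      = fun acc p => if pvKeepB S p then acc ++ [pvGB p] else acc := by
    funext acc p
    cases hp : PySem.Dict.get? pvIndex p.1 with
    | none => simp [pvKeepB, hp]
    | some rs => cases hs : rs.2 <;> simp [pvKeepB, pvGB, pvScopeOk, hp, hs]
  rw [hstep, PySem.List.foldl_append_if]
  simp

theorem pv_TT_pairwise (d : PySem.Dict String String) (S : PySem.Set String) :
    List.Pairwise (fun a b => a.1 < b.1) (pvTT d S) := by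
  simp only [pvTT, List.pairwise_map]
  exact List.Pairwise.sublist List.filter_sublist pv_ranked_pairwise

theorem pv_TT_keys_nodup (d : PySem.Dict String String) (S : PySem.Set String) :
    ((pvTT d S).map (fun t => t.2.1)).Nodup := by
  simp only [pvTT, List.map_map]
  have hsub : ((pvRanked.filter (fun e => pvKeepF d S (e.2.1, e.2.2))).map
      (fun e => e.2.1)).Sublist (pvRanked.map (fun e => e.2.1)) :=
    List.Sublist.map _ List.filter_sublist
  simpa [Function.comp] using List.Nodup.sublist hsub pv_ranked_keys_nodup

theorem pv_perm (claims : List (String × String)) (scopes : List String) :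
    (pvTT (PySem.Dict.mk claims) (PySem.Set.ofList scopes)).Perm
      (((pvItems claims).filter (pvKeepB (PySem.Set.ofList scopes))).map pvGB) := by
  have hTTnd : (pvTT (PySem.Dict.mk claims) (PySem.Set.ofList scopes)).Nodup :=
    List.Nodup.of_map _ (pv_TT_keys_nodup _ _)
  have hpick_keys : ((((pvItems claims).filter (pvKeepB (PySem.Set.ofList scopes))).map pvGB).map
      (fun t => t.2.1)).Nodup := by
    have heq : ((((pvItems claims).filter (pvKeepB (PySem.Set.ofList scopes))).map pvGB).map
        (fun t => t.2.1)) = ((pvItems claims).filter (pvKeepB (PySem.Set.ofList scopes))).map (fun p => p.1) := by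
      simp [pvGB, List.map_map, Function.comp_def]
    rw [heq]
    exact List.Nodup.sublist (List.Sublist.map _ List.filter_sublist) (pv_pvItems_keys_nodup claims)
  have hpicknd : (((pvItems claims).filter (pvKeepB (PySem.Set.ofList scopes))).map pvGB).Nodup :=
    List.Nodup.of_map _ hpick_keys
  refine (List.perm_ext_iff_of_nodup hTTnd hpicknd).2 ?_
  intro x
  constructor
  · intro hx
    obtain ⟨e, he, rfl⟩ := List.mem_map.1 hx
    obtain ⟨he1, he2⟩ := List.mem_filter.1 he
    have he2' : ((PySem.Dict.mk claims).get? e.2.1).isSome = true ∧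
        pvScopeOk (PySem.Set.ofList scopes) e.2.2 = true := by
      simpa [pvKeepF] using he2
    obtain ⟨v, hv⟩ := Option.isSome_iff_exists.1 he2'.1
    have hitems : (e.2.1, v) ∈ pvItems claims := (pv_mem_pvItems _ _ _).2 hv
    have hidx : PySem.Dict.get? pvIndex e.2.1 = some (e.1, e.2.2) := (pv_idx _ _ _).2 he1
    refine List.mem_map.2 ⟨(e.2.1, v), List.mem_filter.2 ⟨hitems, ?_⟩, ?_⟩
    · simpa [pvKeepB, hidx] using he2'.2
    · simp [pvGB, pvVal, hidx, hv]
  · intro hx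
    obtain ⟨p, hp, rfl⟩ := List.mem_map.1 hx
    obtain ⟨hpi, hpk⟩ := List.mem_filter.1 hp
    cases hidx : PySem.Dict.get? pvIndex p.1 with
    | none => simp [pvKeepB, hidx] at hpk
    | some rs =>
        have hsok : pvScopeOk (PySem.Set.ofList scopes) rs.2 = true := by
          simpa [pvKeepB, hidx] using hpk
        have hmemR : (rs.1, p.1, rs.2) ∈ pvRanked := (pv_idx _ _ _).1 hidx
        have hv : (PySem.Dict.mk claims).get? p.1 = some p.2 := (pv_mem_pvItems _ _ _).1 hpi
        refine List.mem_map.2 ⟨(rs.1, p.1, rs.2), List.mem_filter.2 ⟨hmemR, ?_⟩, ?_⟩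
        · simp [pvKeepF, hv, hsok]
        · simp [pvGB, pvVal, hidx, hv]


-- ===== VERDICT (by name: the statement is the Claim_ definition above) =====
theorem filter_claims_by_scope_spec : Claim_equal_filter_claims_by_scope := by
  intro claims scopes _
  unfold Spec_filter_claims_by_scope
  simp only [filter_claims_by_scope_alt]
  rw [pv_picked claims (PySem.Set.ofList scopes)]
  rw [PySem.List.sorted_eq_of_perm_of_pairwise_lt _ (pvTT (PySem.Dict.mk claims) (PySem.Set.ofList scopes)) _
        (pv_perm claims scopes) (pv_TT_pairwise _ _)]
  rw [PySem.Dict.items_foldl_insert_fresh (pvTT (PySem.Dict.mk claims) (PySem.Set.ofList scopes))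
        (fun t => t.2.1) (fun t => t.2.2) PySem.Dict.empty
        (fun a _ => PySem.Dict.contains_empty _) (pv_TT_keys_nodup _ _)]
  simpa using pv_A_items claims scopes
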